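-- pv_equiv track=rewrite | github.com/HenrYxZ/OS | grupo6@iic2333.ing.puc.cl/reemplazo.py | reemplazar
-- ===== SOURCE A (Python) =====
-- def reemplazar(lista,bloquesFaltantes):
--
--         i = 0
--
--         id = []
--         contadores = []
--
--         while i < len(lista):
--
--                 if not lista[i][0] in id and lista[i][0] != 0:
--                         id.append(lista[i][0])
--                         contadores.append(0)
--
--                 i = i + 1
--
--         i = 0
--
--         while i < len(lista):
--
--                 j = 0
--
--                 while j < len(id):
--
--                         if lista[i][0] == id[j]:
--
--                                 contadores[j] = contadores[j] + 1
--                                 break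
--                         j = j + 1
--
--                 i = i + 1
--
--         min = 0
--         max = 0
--
--         borrar = []
--
--         space = 0
--
--         while space < bloquesFaltantes and len(contadores) > 0:
--
--                 i = 0
--                 while i < len(contadores):
--
--                         if contadores[i] < contadores[min]:
--                                 min = i
--                         if contadores[i] > contadores[max]:
--                                 max = i
--                         i = i + 1
--
--                 if space + contadores[min] < bloquesFaltantes:
--                         space = space+ contadores[max]
--                         borrar.append(id[max])
--                         del contadores[max]
--                         del id[max]
--                         max = 0
--                         min = 0
--                 else:
--                         space = space+ contadores[min]
--                         borrar.append(id[min])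
--                         del contadores[min]
--                         del id[min]
--                         min = 0
--                         max = 0
--
--         return borrar
-- ===== SOURCE B (Python) =====
-- def reemplazar(lista, bloquesFaltantes):
--     # Count occurrences of each nonzero leading id, in first-appearance order.
--     counts = {}
--     for fila in lista:
--         v = fila[0]
--         if v != 0:
--             counts[v] = counts.get(v, 0) + 1
--     # One stable sort by descending count (ties keep first-appearance order).
--     desc = sorted(counts.items(), key=lambda ic: -ic[1])
--     min_count = desc[-1][1] if desc else 0
--     borrar = []
--     space = 0
--     k = 0
--     while k < len(desc) and space < bloquesFaltantes:
--         if space + min_count < bloquesFaltantes: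
--             borrar.append(desc[k][0])
--             space += desc[k][1]
--             k += 1
--         else:
--             for ident, c in desc[k:]:
--                 if c == min_count:
--                     borrar.append(ident)
--                     break
--             break
--     return borrar
-- ===== Notes on version B (the rewrite author's own statement) =====
-- stated objective: faster
-- what changed: A rescans and mutates parallel id/counter lists inside a selection loop (and counts with a quadratic nested scan); B counts with one dict pass, sorts the (id,count) items once by descending count (stable, so ties keep first-appearance order), and walks the sorted list accumulating space, appending the precomputed minimum-count element when the greedy condition fails.
import Mathlib
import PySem

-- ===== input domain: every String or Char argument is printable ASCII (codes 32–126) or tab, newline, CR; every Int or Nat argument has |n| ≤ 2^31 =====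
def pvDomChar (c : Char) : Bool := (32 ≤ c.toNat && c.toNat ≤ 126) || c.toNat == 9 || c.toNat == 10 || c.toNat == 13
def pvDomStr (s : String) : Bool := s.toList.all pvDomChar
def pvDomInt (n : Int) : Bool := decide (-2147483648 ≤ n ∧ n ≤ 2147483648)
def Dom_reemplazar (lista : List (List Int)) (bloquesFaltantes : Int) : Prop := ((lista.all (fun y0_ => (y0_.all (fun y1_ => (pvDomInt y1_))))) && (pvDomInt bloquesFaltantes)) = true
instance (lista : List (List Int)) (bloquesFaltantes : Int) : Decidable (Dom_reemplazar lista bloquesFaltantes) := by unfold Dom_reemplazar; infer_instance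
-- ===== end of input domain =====

-- B replaces A's repeated full rescans of mutable parallel id/counter lists by one dict-counting
-- pass, a single stable sort by descending count, and a single walk (objective: faster).

-- ===== PORT A =====
-- first while loop: collect distinct nonzero leading ids (and a zero counter each)
def reemA_init : List (List Int) → List Int × List Int → List Int × List Int
  | [], st => st
  | fila :: rest, (ids, cs) =>
      let v := fila.headD 0   -- lista[i][0]; exact on nonempty rows (Pre_)
      reemA_init rest (if v ∉ ids ∧ v ≠ 0 then (ids ++ [v], cs ++ [0]) else (ids, cs))

-- inner while loop of the second pass: bump the counter of the first id equal to v, then break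
def reemA_bump (v : Int) : List Int → List Int → List Int
  | i0 :: it, c0 :: ct => if i0 = v then (c0 + 1) :: ct else c0 :: reemA_bump v it ct
  | _, cs => cs

-- second while loop
def reemA_count (lista : List (List Int)) (ids : List Int) (cs : List Int) : List Int :=
  lista.foldl (fun cs fila => reemA_bump (fila.headD 0) ids cs) cs

-- inner index scan of the selection loop: first-minimal and first-maximal counter index
def reemA_scan (cs : List Int) (i mn mx : Nat) : Nat × Nat :=
  if i < cs.length then
    reemA_scan cs (i + 1)
      (if cs.getD i 0 < cs.getD mn 0 then i else mn)
      (if cs.getD i 0 > cs.getD mx 0 then i else mx)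
  else (mn, mx)
termination_by cs.length - i

-- the selection while loop; each iteration deletes one element, so fuel = cs.length suffices
def reemA_pick : Nat → List Int → List Int → List Int → Int → Int → List Int
  | 0, _, _, borrar, _, _ => borrar
  | fuel + 1, ids, cs, borrar, space, B =>
    if space < B ∧ cs ≠ [] then
      let mm := reemA_scan cs 0 0 0
      if space + cs.getD mm.1 0 < B then
        reemA_pick fuel (ids.eraseIdx mm.2) (cs.eraseIdx mm.2)
          (borrar ++ [ids.getD mm.2 0]) (space + cs.getD mm.2 0) B
      else
        reemA_pick fuel (ids.eraseIdx mm.1) (cs.eraseIdx mm.1)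
          (borrar ++ [ids.getD mm.1 0]) (space + cs.getD mm.1 0) B
    else borrar

def reemplazar (lista : List (List Int)) (bloquesFaltantes : Int) : List Int :=
  let st := reemA_init lista ([], [])
  let cs := reemA_count lista st.1 st.2
  reemA_pick cs.length st.1 cs [] 0 bloquesFaltantes

-- ===== PORT B =====
-- counting pass: counts[v] = counts.get(v, 0) + 1 for each nonzero leading id
def reemB_counts (lista : List (List Int)) : PySem.Dict Int Int :=
  lista.foldl (fun d fila =>
    let v := fila.headD 0   -- fila[0]; exact on nonempty rows (Pre_)
    if v ≠ 0 then d.insert v (d.getD v 0 + 1) else d) PySem.Dict.empty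

-- the inner for/break: id of the first pair whose count equals m
def reemB_firstEq (m : Int) : List (Int × Int) → List Int
  | [] => []
  | d :: dt => if d.2 = m then [d.1] else reemB_firstEq m dt

-- the while loop over the sorted list (the suffix from index k) accumulating space
def reemB_walk (m : Int) : List (Int × Int) → List Int → Int → Int → List Int
  | [], borrar, _, _ => borrar
  | d :: dt, borrar, space, B =>
    if space < B then
      if space + m < B then reemB_walk m dt (borrar ++ [d.1]) (space + d.2) B
      else borrar ++ reemB_firstEq m (d :: dt)
    else borrar

def reemplazar_alt (lista : List (List Int)) (bloquesFaltantes : Int) : List Int :=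
  let desc := PySem.List.sorted (reemB_counts lista).items (fun ic => -ic.2) false
  let m := if desc ≠ [] then (PySem.List.pyGetD desc (-1) (0, 0)).2 else 0
  reemB_walk m desc [] 0 bloquesFaltantes

-- ===== PRECONDITION & SPEC =====
-- Pre_ excludes inputs containing an empty row: there both A and B raise IndexError on fila[0].
def Pre_reemplazar (lista : List (List Int)) (bloquesFaltantes : Int) : Prop :=
  ∀ fila ∈ lista, fila ≠ []
instance (lista : List (List Int)) (bloquesFaltantes : Int) : Decidable (Pre_reemplazar lista bloquesFaltantes) := by
  unfold Pre_reemplazar; infer_instance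

def pvWitness_reemplazar : List (List Int) × Int := ([[1], [2], [1], [3], [2], [1]], 3)

def Spec_reemplazar (lista : List (List Int)) (bloquesFaltantes : Int) (out : List Int) : Prop := out = reemplazar_alt lista bloquesFaltantes
instance (lista : List (List Int)) (bloquesFaltantes : Int) (out : List Int) : Decidable (Spec_reemplazar lista bloquesFaltantes out) := by unfold Spec_reemplazar; infer_instance

-- ===== CLAIM (what is proved, stated in full; the proofs are below) =====
def Claim_equal_reemplazar : Prop := ∀ (lista : List (List Int)) (bloquesFaltantes : Int), Dom_reemplazar lista bloquesFaltantes → Pre_reemplazar lista bloquesFaltantes → Spec_reemplazar lista bloquesFaltantes (reemplazar lista bloquesFaltantes)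

-- ===== LEMMAS AND PROOFS =====

-- the stream of leading entries, and its nonzero part
def pvHeads (lista : List (List Int)) : List Int := lista.map (fun fila => fila.headD 0)
def pvNzHeads (lista : List (List Int)) : List Int := (pvHeads lista).filter (fun v => decide (v ≠ 0))

-- the sort key B uses
def pvK (e : Int × Int) : Int := -e.2

-- first-minimal / first-maximal index of a list of counters
def pvFstMin (cs : List Int) (i : Nat) : Prop :=
  i < cs.length ∧ (∀ j, j < cs.length → cs.getD i 0 ≤ cs.getD j 0) ∧
    (∀ j, j < i → cs.getD i 0 < cs.getD j 0)
def pvFstMax (cs : List Int) (i : Nat) : Prop :=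
  i < cs.length ∧ (∀ j, j < cs.length → cs.getD j 0 ≤ cs.getD i 0) ∧
    (∀ j, j < i → cs.getD j 0 < cs.getD i 0)

-- ---- phase 1: A's first loop builds exactly set(nonzero heads) with zero counters ----

theorem reemA_init_fst (lista : List (List Int)) (ids cs : List Int) :
    (reemA_init lista (ids, cs)).1 = PySem.Set.update ids (pvNzHeads lista) := by
  induction lista generalizing ids cs with
  | nil => simp [reemA_init, pvNzHeads, pvHeads, PySem.Set.update]
  | cons fila rest ih =>
    cases fila with
    | nil =>
      simp only [reemA_init, List.headD]
      rw [if_neg (by simp)]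
      rw [ih]
      simp [pvNzHeads, pvHeads]
    | cons a t =>
      simp only [reemA_init, List.headD]
      by_cases h0 : a = 0
      · rw [if_neg (by simp [h0])]
        rw [ih]
        simp [pvNzHeads, pvHeads, h0]
      · by_cases hm : a ∈ ids
        · rw [if_neg (by simp [hm])]
          rw [ih]
          simp [pvNzHeads, pvHeads, PySem.Set.update, h0, PySem.Set.add, hm]
        · rw [if_pos ⟨by simpa using hm, by simpa using h0⟩]
          rw [ih]
          simp [pvNzHeads, pvHeads, PySem.Set.update, h0, PySem.Set.add, hm]

theorem reemA_init_snd (lista : List (List Int)) (ids cs : List Int)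
    (h : cs = List.replicate ids.length 0) :
    (reemA_init lista (ids, cs)).2 = List.replicate (reemA_init lista (ids, cs)).1.length 0 := by
  induction lista generalizing ids cs with
  | nil => simp [reemA_init, h]
  | cons fila rest ih =>
    simp only [reemA_init]
    split
    · exact ih _ _ (by simp [h, List.replicate_succ'])
    · exact ih _ _ h

-- ---- phase 2: A's counting loops compute the occurrence count of each id ----

theorem reemA_bump_map (S : List Int) (f : Int → Int) (v : Int) (hnd : S.Nodup) :
    reemA_bump v S (S.map f) = S.map (fun x => if x = v then f x + 1 else f x) := by
  induction S with
  | nil => simp [reemA_bump]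
  | cons s t ih =>
    simp only [List.map_cons, reemA_bump]
    by_cases hs : s = v
    · subst hs
      rw [if_pos rfl, if_pos rfl]
      congr 1
      exact (List.map_congr_left (fun x hx => by
        have : x ≠ s := fun h => (List.nodup_cons.mp hnd).1 (h ▸ hx)
        simp [this])).symm
    · rw [if_neg hs, if_neg hs]
      rw [ih (List.nodup_cons.mp hnd).2]

theorem reemA_count_map (hs : List Int) (S : List Int) (f : Int → Int) (hnd : S.Nodup) :
    hs.foldl (fun cs v => reemA_bump v S cs) (S.map f)
      = S.map (fun x => f x + hs.count x) := by
  induction hs generalizing f with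
  | nil => simp
  | cons v t ih =>
    simp only [List.foldl_cons]
    rw [reemA_bump_map S f v hnd]
    have := ih (fun x => if x = v then f x + 1 else f x)
    rw [this]
    apply List.map_congr_left
    intro x hx
    by_cases hxv : x = v <;> simp [hxv, List.count_cons] <;> omega

theorem reemB_counts_eq (lista : List (List Int)) :
    reemB_counts lista = PySem.Dict.counter (pvNzHeads lista) := by
  rw [PySem.Dict.counter_eq_foldl, pvNzHeads, pvHeads, List.foldl_filter, List.foldl_map]
  unfold reemB_counts
  congr 1
  funext d fila
  simp only [PySem.Dict.modify]
  split_ifs with h1 h2 <;> simp_all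

-- ---- the index scan finds the first-minimal and first-maximal counter ----

theorem reemA_scan_inv (cs : List Int) (k : Nat) : ∀ i mn mx, cs.length - i = k →
    mn < cs.length → mx < cs.length →
    (∀ j, j < i → cs.getD mn 0 ≤ cs.getD j 0) →
    (∀ j, j < mn → cs.getD mn 0 < cs.getD j 0) →
    (∀ j, j < i → cs.getD j 0 ≤ cs.getD mx 0) →
    (∀ j, j < mx → cs.getD j 0 < cs.getD mx 0) →
    pvFstMin cs (reemA_scan cs i mn mx).1 ∧ pvFstMax cs (reemA_scan cs i mn mx).2 := by
  induction k with
  | zero =>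
    intro i mn mx hk hmn hmx h1 h2 h3 h4
    have hi : ¬ i < cs.length := by omega
    rw [reemA_scan, if_neg hi]
    exact ⟨⟨hmn, fun j hj => h1 j (by omega), h2⟩, ⟨hmx, fun j hj => h3 j (by omega), h4⟩⟩
  | succ k ih =>
    intro i mn mx hk hmn hmx h1 h2 h3 h4
    have hi : i < cs.length := by omega
    rw [reemA_scan, if_pos hi]
    have hmin1 : ∀ mn', mn' = (if cs.getD i 0 < cs.getD mn 0 then i else mn) →
        mn' < cs.length ∧ (∀ j, j < i + 1 → cs.getD mn' 0 ≤ cs.getD j 0) ∧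
          (∀ j, j < mn' → cs.getD mn' 0 < cs.getD j 0) := by
      intro mn' hmn'
      by_cases hc : cs.getD i 0 < cs.getD mn 0
      · rw [if_pos hc] at hmn'; subst hmn'
        refine ⟨hi, ?_, ?_⟩
        · intro j hj
          rcases Nat.lt_succ_iff_lt_or_eq.mp hj with hj' | rfl
          · exact le_of_lt (lt_of_lt_of_le hc (h1 j hj'))
          · exact le_refl _
        · intro j hj
          exact lt_of_lt_of_le hc (h1 j hj)
      · rw [if_neg hc] at hmn'; subst hmn'
        refine ⟨hmn, ?_, h2⟩
        intro j hj
        rcases Nat.lt_succ_iff_lt_or_eq.mp hj with hj' | rfl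
        · exact h1 j hj'
        · exact le_of_not_gt hc
    have hmax1 : ∀ mx', mx' = (if cs.getD i 0 > cs.getD mx 0 then i else mx) →
        mx' < cs.length ∧ (∀ j, j < i + 1 → cs.getD j 0 ≤ cs.getD mx' 0) ∧
          (∀ j, j < mx' → cs.getD j 0 < cs.getD mx' 0) := by
      intro mx' hmx'
      by_cases hc : cs.getD i 0 > cs.getD mx 0
      · rw [if_pos hc] at hmx'; subst hmx'
        refine ⟨hi, ?_, ?_⟩
        · intro j hj
          rcases Nat.lt_succ_iff_lt_or_eq.mp hj with hj' | rfl
          · exact le_of_lt (lt_of_le_of_lt (h3 j hj') hc)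
          · exact le_refl _
        · intro j hj
          exact lt_of_le_of_lt (h3 j hj) hc
      · rw [if_neg hc] at hmx'; subst hmx'
        refine ⟨hmx, ?_, h4⟩
        intro j hj
        rcases Nat.lt_succ_iff_lt_or_eq.mp hj with hj' | rfl
        · exact h3 j hj'
        · exact le_of_not_gt hc
    obtain ⟨ha, hb, hcx⟩ := hmin1 _ rfl
    obtain ⟨hd, he, hf⟩ := hmax1 _ rfl
    exact ih (i+1) _ _ (by omega) ha hd hb hcx he hf

theorem reemA_scan_spec (cs : List Int) (h : cs ≠ []) :
    pvFstMin cs (reemA_scan cs 0 0 0).1 ∧ pvFstMax cs (reemA_scan cs 0 0 0).2 := by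
  have hl : 0 < cs.length := List.length_pos_iff.mpr h
  exact reemA_scan_inv cs cs.length 0 0 0 (by omega) hl hl
    (fun j hj => by omega) (fun j hj => by omega) (fun j hj => by omega) (fun j hj => by omega)

-- ---- stable-sort selection: head of sorted = first maximal-count element ----

theorem pv_insertBy_cons (b : (Int × Int) → (Int × Int) → Bool) (x y : Int × Int) (l : List (Int × Int)) :
    PySem.List.insertBy b x (y :: l) = if b x y = true then x :: y :: l else y :: PySem.List.insertBy b x l := rfl

theorem pv_sorted_snoc (P : List (Int × Int)) (x : Int × Int) :
    PySem.List.sorted (P ++ [x]) pvK false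
      = PySem.List.insertBy (fun a b => decide (pvK a < pvK b)) x (PySem.List.sorted P pvK false) := by
  rw [PySem.List.sorted_eq_foldl_insertBy, PySem.List.sorted_eq_foldl_insertBy, List.foldl_append]
  rfl

theorem sorted_head_sel (P : List (Int × Int)) : ∀ (d : Int × Int) (dt : List (Int × Int)),
    PySem.List.sorted P pvK false = d :: dt →
    ∃ i, i < P.length ∧ P.getD i (0,0) = d ∧
      (∀ j, j < P.length → (P.getD j (0,0)).2 ≤ d.2) ∧
      (∀ j, j < i → (P.getD j (0,0)).2 < d.2) ∧
      dt = PySem.List.sorted (P.eraseIdx i) pvK false := by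
  induction P using List.reverseRecOn with
  | nil => intro d dt h; rw [(PySem.List.sorted_eq_nil_iff [] pvK false).mpr rfl] at h; cases h
  | append_singleton P x ih =>
    intro d dt h
    rw [pv_sorted_snoc] at h
    cases hP : PySem.List.sorted P pvK false with
    | nil =>
      have hPnil : P = [] := (PySem.List.sorted_eq_nil_iff P pvK false).mp hP
      subst hPnil
      rw [hP] at h
      simp only [PySem.List.insertBy] at h
      cases h
      exact ⟨0, by simp, by simp, by simp, by simp, by
        simp [(PySem.List.sorted_eq_nil_iff [] pvK false).mpr rfl]⟩
    | cons d0 dt0 =>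
      obtain ⟨i, hi, hgd, hmax, hstrict, hdt⟩ := ih d0 dt0 hP
      rw [hP, pv_insertBy_cons] at h
      by_cases hx : pvK x < pvK d0
      · rw [if_pos (by simpa using hx)] at h
        obtain ⟨h1, h2⟩ := List.cons_eq_cons.mp h
        subst h1; subst h2
        refine ⟨P.length, by simp, by simp, ?_, ?_, ?_⟩
        · intro j hj
          rcases Nat.lt_succ_iff_lt_or_eq.mp (by simpa using hj) with hj' | rfl
          · rw [List.getD_append _ _ _ _ hj']
            have : pvK x < pvK d0 := hx
            have hd0x : d0.2 < x.2 := by simp [pvK] at this; omega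
            exact le_of_lt (lt_of_le_of_lt (hmax j hj') hd0x)
          · simp
        · intro j hj
          rw [List.getD_append _ _ _ _ hj]
          have hd0x : d0.2 < x.2 := by simp [pvK] at hx; omega
          exact lt_of_le_of_lt (hmax j hj) hd0x
        · rw [List.eraseIdx_append_of_length_le (le_refl _), Nat.sub_self]
          simp [hP]
      · rw [if_neg (by simpa using hx)] at h
        obtain ⟨h1, h2⟩ := List.cons_eq_cons.mp h
        subst h1; subst h2
        have hxd : x.2 ≤ d0.2 := by simp [pvK] at hx; omega
        refine ⟨i, by simp; omega, ?_, ?_, ?_, ?_⟩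
        · rw [List.getD_append _ _ _ _ hi]; exact hgd
        · intro j hj
          rcases Nat.lt_succ_iff_lt_or_eq.mp (by simpa using hj) with hj' | rfl
          · rw [List.getD_append _ _ _ _ hj']; exact hmax j hj'
          · simpa using hxd
        · intro j hj
          rw [List.getD_append _ _ _ _ (lt_trans hj hi)]
          exact hstrict j hj
        · rw [List.eraseIdx_append_of_lt_length hi, pv_sorted_snoc, hdt]

-- ---- the first minimal-count element is the same in P and in sorted P ----

theorem firstEq_eraseIdx (P : List (Int × Int)) : ∀ (m : Int) (i : Nat),
    i < P.length → (P.getD i (0,0)).2 ≠ m →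
    reemB_firstEq m (P.eraseIdx i) = reemB_firstEq m P := by
  induction P with
  | nil => intro m i hi; simp at hi
  | cons p t ih =>
    intro m i hi hne
    cases i with
    | zero =>
      simp only [List.eraseIdx]
      rw [show reemB_firstEq m (p :: t) = if p.2 = m then [p.1] else reemB_firstEq m t from rfl]
      rw [if_neg (by simpa using hne)]
    | succ i =>
      simp only [List.eraseIdx]
      rw [show reemB_firstEq m (p :: t.eraseIdx i) = if p.2 = m then [p.1] else reemB_firstEq m (t.eraseIdx i) from rfl,
        show reemB_firstEq m (p :: t) = if p.2 = m then [p.1] else reemB_firstEq m t from rfl]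
      by_cases hp : p.2 = m
      · rw [if_pos hp, if_pos hp]
      · rw [if_neg hp, if_neg hp]
        exact ih m i (by simpa using hi) (by simpa using hne)

theorem firstEq_sorted (n : Nat) : ∀ (P : List (Int × Int)), P.length = n → ∀ (m : Int),
    (∀ e ∈ P, m ≤ e.2) →
    reemB_firstEq m (PySem.List.sorted P pvK false) = reemB_firstEq m P := by
  induction n using Nat.strong_induction_on with
  | _ n ih =>
    intro P hn m hlb
    cases hS : PySem.List.sorted P pvK false with
    | nil =>
      rw [(PySem.List.sorted_eq_nil_iff P pvK false).mp hS]
    | cons d dt =>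
      obtain ⟨i, hi, hgd, hmax, hstrict, hdt⟩ := sorted_head_sel P d dt hS
      by_cases hd : d.2 = m
      · -- all counts equal m; the head of sorted is also the head of P
        have hi0 : i = 0 := by
          by_contra h0
          have h1 := hstrict 0 (Nat.pos_of_ne_zero h0)
          have h2 : m ≤ (P.getD 0 (0,0)).2 := by
            apply hlb
            have : 0 < P.length := by omega
            rw [List.getD_eq_getElem _ _ this]
            exact List.getElem_mem _
          omega
        subst hi0
        have hP0 : P.getD 0 (0,0) = d := hgd
        cases P with
        | nil => simp at hi
        | cons p t =>
          have hpd : p = d := by simpa using hP0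
          subst hpd
          rw [show reemB_firstEq m (p :: dt) = if p.2 = m then [p.1] else reemB_firstEq m dt from rfl,
            show reemB_firstEq m (p :: t) = if p.2 = m then [p.1] else reemB_firstEq m t from rfl,
            if_pos hd, if_pos hd]
      · -- head of sorted does not carry count m: drop it on both sides
        rw [show reemB_firstEq m (d :: dt) = if d.2 = m then [d.1] else reemB_firstEq m dt from rfl,
          if_neg hd, hdt]
        have hlen : (P.eraseIdx i).length < n := by
          rw [List.length_eraseIdx_of_lt hi]; omega
        rw [ih _ hlen (P.eraseIdx i) rfl m
          (fun e he => hlb e ((List.eraseIdx_sublist P i).subset he))]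
        exact firstEq_eraseIdx P m i hi (by rw [hgd]; exact hd)

-- ---- membership survives erasing an index holding a different element ----

theorem pv_mem_eraseIdx (P : List (Int×Int)) (w : Int×Int) (i : Nat) (hi : i < P.length)
    (hw : w ∈ P) (hne : P[i] ≠ w) : w ∈ P.eraseIdx i := by
  obtain ⟨j, hj, rfl⟩ := List.mem_iff_getElem.mp hw
  have hij : i ≠ j := fun h => hne (by subst h; rfl)
  rw [List.eraseIdx_eq_take_drop_succ]
  rcases Nat.lt_or_ge j i with h | h
  · exact List.mem_append_left _ (by
      rw [List.mem_take_iff_getElem]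
      exact ⟨j, by omega, rfl⟩)
  · apply List.mem_append_right
    rw [List.mem_iff_getElem]
    exact ⟨j - (i+1), by rw [List.length_drop]; omega, by rw [List.getElem_drop]; congr 1; omega⟩

-- ---- the main loop equivalence ----

theorem reemA_pick_stop (fuel : Nat) (ids cs borrar : List Int) (space B : Int)
    (h : ¬ space < B) : reemA_pick fuel ids cs borrar space B = borrar := by
  cases fuel with
  | zero => rfl
  | succ fuel => rw [reemA_pick, if_neg (by tauto)]

theorem pv_map_getD {β : Type} [Inhabited β] (P : List (Int × Int)) (f : Int × Int → β) (j : Nat)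
    (hj : j < P.length) (dflt : β) : (P.map f).getD j dflt = f (P.getD j (0,0)) := by
  rw [List.getD_eq_getElem _ _ (by simpa using hj), List.getD_eq_getElem _ _ hj, List.getElem_map]

theorem firstEq_at (P : List (Int × Int)) : ∀ (m : Int) (i : Nat), i < P.length →
    (P.getD i (0,0)).2 = m → (∀ j, j < i → (P.getD j (0,0)).2 ≠ m) →
    reemB_firstEq m P = [(P.getD i (0,0)).1] := by
  induction P with
  | nil => intro m i hi; simp at hi
  | cons p t ih =>
    intro m i hi hm hpre
    cases i with
    | zero =>
      rw [show reemB_firstEq m (p :: t) = if p.2 = m then [p.1] else reemB_firstEq m t from rfl,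
        if_pos (by simpa using hm)]
      simp
    | succ i =>
      have hp : p.2 ≠ m := by simpa using hpre 0 (Nat.succ_pos _)
      rw [show reemB_firstEq m (p :: t) = if p.2 = m then [p.1] else reemB_firstEq m t from rfl,
        if_neg hp]
      have := ih m i (by simpa using hi) (by simpa using hm)
        (fun j hj => by simpa using hpre (j+1) (by omega))
      simpa using this

theorem main_loop (n : Nat) : ∀ (P : List (Int × Int)), P.length = n →
    ∀ (m : Int), (∀ e ∈ P, m ≤ e.2) → (P ≠ [] → ∃ e ∈ P, e.2 = m) →
    ∀ (borrar : List Int) (space B : Int),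
    reemA_pick P.length (P.map Prod.fst) (P.map Prod.snd) borrar space B
      = reemB_walk m (PySem.List.sorted P pvK false) borrar space B := by
  induction n using Nat.strong_induction_on with
  | _ n ih =>
    intro P hn m hlb hatt borrar space B
    cases hS : PySem.List.sorted P pvK false with
    | nil =>
      have hP : P = [] := (PySem.List.sorted_eq_nil_iff P pvK false).mp hS
      subst hP
      rfl
    | cons d dt =>
      have hP : P ≠ [] := fun h => by
        rw [h, (PySem.List.sorted_eq_nil_iff [] pvK false).mpr rfl] at hS; cases hS
      by_cases hsp : space < B
      case neg =>
        rw [reemA_pick_stop _ _ _ _ _ _ hsp, reemB_walk, if_neg hsp]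
      case pos =>
      obtain ⟨k, hk⟩ : ∃ k, P.length = k + 1 :=
        ⟨P.length - 1, by have := List.length_pos_iff.mpr hP; omega⟩
      set cs := P.map Prod.snd with hcs
      have hcsne : cs ≠ [] := by simp [hcs, hP]
      have hcslen : cs.length = P.length := by simp [hcs]
      have hbr : ∀ j, j < P.length → cs.getD j 0 = (P.getD j (0,0)).2 := fun j hj =>
        pv_map_getD P Prod.snd j hj 0
      obtain ⟨⟨hmn1, hmn2, hmn3⟩, ⟨hmx1, hmx2, hmx3⟩⟩ := reemA_scan_spec cs hcsne
      obtain ⟨i, hi, hgd, hmaxP, hstrictP, hdt⟩ := sorted_head_sel P d dt hS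
      set mm := reemA_scan cs 0 0 0 with hmm
      rw [hcslen] at hmn1 hmx1
      -- mm.2 = i : both are the first index of maximal count
      have hieq : mm.2 = i := by
        by_contra hne
        rcases Nat.lt_or_ge mm.2 i with h | h
        · have h1 := hstrictP mm.2 h
          have h3 := hmx2 i (by omega)
          rw [hbr i hi, hgd, hbr mm.2 (by omega)] at h3
          omega
        · have hlt : i < mm.2 := by omega
          have h1 := hmx3 i hlt
          have h2 := hmaxP mm.2 (by omega)
          rw [hbr i hi, hgd, hbr mm.2 (by omega)] at h1
          omega
      -- the minimal count is m
      have hcm : cs.getD mm.1 0 = m := by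
        obtain ⟨w, hwP, hwm⟩ := hatt hP
        obtain ⟨jw, hjw, rfl⟩ := List.mem_iff_getElem.mp hwP
        have h1 := hmn2 jw (by omega)
        rw [hbr jw hjw] at h1
        rw [List.getD_eq_getElem _ _ hjw] at h1
        have h2 : m ≤ cs.getD mm.1 0 := by
          rw [hbr mm.1 (by omega)]
          apply hlb
          rw [List.getD_eq_getElem _ _ (by omega : mm.1 < P.length)]
          exact List.getElem_mem _
        omega
      rw [hk]
      rw [show reemA_pick (k+1) (P.map Prod.fst) cs borrar space B
            = if space < B ∧ cs ≠ [] then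
                (if space + cs.getD (reemA_scan cs 0 0 0).1 0 < B then
                  reemA_pick k ((P.map Prod.fst).eraseIdx (reemA_scan cs 0 0 0).2) (cs.eraseIdx (reemA_scan cs 0 0 0).2)
                    (borrar ++ [(P.map Prod.fst).getD (reemA_scan cs 0 0 0).2 0]) (space + cs.getD (reemA_scan cs 0 0 0).2 0) B
                else
                  reemA_pick k ((P.map Prod.fst).eraseIdx (reemA_scan cs 0 0 0).1) (cs.eraseIdx (reemA_scan cs 0 0 0).1)
                    (borrar ++ [(P.map Prod.fst).getD (reemA_scan cs 0 0 0).1 0]) (space + cs.getD (reemA_scan cs 0 0 0).1 0) B)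
              else borrar from rfl]
      rw [if_pos ⟨hsp, hcsne⟩, ← hmm, hcm]
      rw [reemB_walk, if_pos hsp]
      by_cases hbranch : space + m < B
      case pos =>
        rw [if_pos hbranch, if_pos hbranch]
        -- A recurses on P' = P.eraseIdx i, B recurses on dt = sorted P'
        rw [hieq]
        have hidg : (P.map Prod.fst).getD i 0 = d.1 := by rw [pv_map_getD P Prod.fst i hi, hgd]
        have hcdg : cs.getD i 0 = d.2 := by rw [hbr i hi, hgd]
        rw [hidg, hcdg, hcs, List.eraseIdx_map, List.eraseIdx_map]
        have hlen' : (P.eraseIdx i).length = k := by rw [List.length_eraseIdx_of_lt hi]; omega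
        have hmem' : ∀ e ∈ P.eraseIdx i, e ∈ P := fun e he => (List.eraseIdx_sublist P i).subset he
        have hattr : P.eraseIdx i ≠ [] → ∃ e ∈ P.eraseIdx i, e.2 = m := by
          intro hne
          by_cases hdm : d.2 = m
          · obtain ⟨e, he⟩ := List.exists_mem_of_ne_nil _ hne
            refine ⟨e, he, ?_⟩
            have h1 : m ≤ e.2 := hlb e (hmem' e he)
            obtain ⟨je, hje, rfl⟩ := List.mem_iff_getElem.mp (hmem' e he)
            have h2 := hmaxP je hje
            rw [List.getD_eq_getElem _ _ hje] at h2
            omega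
          · obtain ⟨w, hwP, hwm⟩ := hatt hP
            refine ⟨w, ?_, hwm⟩
            apply pv_mem_eraseIdx P w i hi hwP
            rw [← List.getD_eq_getElem _ (0,0) hi, hgd]
            intro h; rw [← h] at hwm; exact hdm hwm
        have := ih k (by omega) (P.eraseIdx i) hlen' m
          (fun e he => hlb e (hmem' e he)) hattr (borrar ++ [d.1]) (space + d.2) B
        rw [hlen'] at this
        rw [this, ← hdt]
      case neg =>
        rw [if_neg hbranch, if_neg hbranch]
        -- A appends the first-min id and stops; B searches the sorted list for count m
        rw [reemA_pick_stop _ _ _ _ _ _ (by omega)]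
        have hfe : reemB_firstEq m (d :: dt) = [(P.getD mm.1 (0,0)).1] := by
          rw [← hS, firstEq_sorted P.length P rfl m hlb]
          apply firstEq_at P m mm.1 (by omega)
          · rw [← hbr mm.1 (by omega)]; exact hcm
          · intro j hj
            have h1 := hmn3 j hj
            have h2 := hmn2 j (by omega)
            rw [hbr j (by omega), hbr mm.1 (by omega)] at h1
            rw [← hbr mm.1 (by omega), hcm] at *
            omega
        rw [hfe, pv_map_getD P Prod.fst mm.1 (by omega)]

-- ===== VERDICT (by name: the statement is the Claim_ definition above) =====
theorem reemplazar_spec : Claim_equal_reemplazar := by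
  intro lista bf _ _
  show reemplazar lista bf = reemplazar_alt lista bf
  have hnd : (PySem.Set.ofList (pvNzHeads lista)).Nodup := PySem.Set.nodup_ofList _
  -- A's first two phases produce the ids S and their occurrence counts
  have hids : (reemA_init lista ([], [])).1 = PySem.Set.ofList (pvNzHeads lista) :=
    reemA_init_fst lista [] []
  have hzeros : (reemA_init lista ([], [])).2
      = List.replicate (PySem.Set.ofList (pvNzHeads lista)).length 0 := by
    rw [reemA_init_snd lista [] [] rfl, hids]
  have hcnt : reemA_count lista (reemA_init lista ([], [])).1 (reemA_init lista ([], [])).2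
      = (PySem.Set.ofList (pvNzHeads lista)).map (fun x => ((pvNzHeads lista).count x : Int)) := by
    rw [hids, hzeros, reemA_count]
    rw [show (List.replicate (PySem.Set.ofList (pvNzHeads lista)).length (0:Int))
          = (PySem.Set.ofList (pvNzHeads lista)).map (fun _ => (0:Int)) by simp]
    rw [show lista.foldl (fun cs fila => reemA_bump (fila.headD 0) (PySem.Set.ofList (pvNzHeads lista)) cs)
            ((PySem.Set.ofList (pvNzHeads lista)).map (fun _ => (0:Int)))
          = (pvHeads lista).foldl (fun cs v => reemA_bump v (PySem.Set.ofList (pvNzHeads lista)) cs)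
            ((PySem.Set.ofList (pvNzHeads lista)).map (fun _ => (0:Int))) by
        rw [pvHeads, List.foldl_map]]
    rw [reemA_count_map (pvHeads lista) _ _ hnd]
    apply List.map_congr_left
    intro x hx
    have hxnz : x ∈ pvNzHeads lista := (PySem.Set.mem_ofList _ _).mp hx
    have hxne : decide (x ≠ 0) = true := (List.mem_filter.mp hxnz).2
    rw [pvNzHeads, List.count_filter (by simpa using hxne)]
    omega
  -- both sides are about P, the ids paired with their counts in first-appearance order
  set P : List (Int × Int) :=
    (PySem.Set.ofList (pvNzHeads lista)).map (fun x => (x, ((pvNzHeads lista).count x : Int))) with hP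
  have hPf : P.map Prod.fst = PySem.Set.ofList (pvNzHeads lista) := by
    rw [hP, List.map_map,
      show (Prod.fst ∘ fun x : Int => (x, ((pvNzHeads lista).count x : Int))) = id from rfl,
      List.map_id]
  have hPs : P.map Prod.snd
      = (PySem.Set.ofList (pvNzHeads lista)).map (fun x => ((pvNzHeads lista).count x : Int)) := by
    rw [hP, List.map_map]; rfl
  have hitems : (reemB_counts lista).items = P := by
    rw [reemB_counts_eq, PySem.Dict.items_counter]
  have hkey : (fun ic : Int × Int => -ic.2) = pvK := rfl
  rw [reemplazar, reemplazar_alt, hitems, hkey, hcnt, hids, ← hPs, ← hPf]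
  rw [show (P.map Prod.snd).length = P.length by simp]
  -- the value B precomputes for min_count is a lower bound on the counts, attained when P ≠ []
  by_cases hPnil : P = []
  · rw [hPnil]
    exact main_loop 0 [] rfl _ (by intro e he; cases he) (fun h => absurd rfl h) [] 0 bf
  · have hdesc : PySem.List.sorted P pvK false ≠ [] := by
      rw [Ne, PySem.List.sorted_eq_nil_iff]; exact hPnil
    have hlen : 0 < (PySem.List.sorted P pvK false).length := List.length_pos_iff.mpr hdesc
    rw [if_pos hdesc, PySem.List.pyGetD_neg_one _ _ hdesc]
    apply main_loop P.length P rfl _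
    · intro e he
      obtain ⟨je, hje, rfl⟩ :=
        List.mem_iff_getElem.mp ((PySem.List.sorted_perm P pvK false).symm.subset he)
      have hmono := PySem.List.key_sorted_getElem_mono P pvK (p := je)
        (q := (PySem.List.sorted P pvK false).length - 1) (by omega) (by omega)
      rw [List.getLast_eq_getElem]
      simpa [pvK] using hmono
    · intro _
      exact ⟨_, (PySem.List.sorted_perm P pvK false).subset (List.getLast_mem hdesc), rfl⟩
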